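-- pv_equiv track=rewrite | github.com/lbankurova/send-data-browser | scripts/lint-spec.py | is_acceptance_criteria_section
-- ===== SOURCE A (Python) =====
-- def is_acceptance_criteria_section(paragraph: str, full_text: str, para_start_line: int) -> bool:
--     """Acceptance-criteria sections naturally use 'must' / '>= N' for spec
--     contracts -- not per-feature behavioral requirements about the system.
--     Skip behavioral-requirement checks when the paragraph is inside an
--     'Acceptance criteria' / 'Acceptance' section (heading H2/H3 above)."""
--     lines = full_text.splitlines()
--     # Walk backwards from the paragraph start looking for a heading
--     for i in range(min(para_start_line - 1, len(lines)) - 1, -1, -1):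
--         line = lines[i].strip()
--         if line.startswith("#"):
--             heading_text = line.lstrip("#").strip().lower()
--             if "acceptance" in heading_text or "non-goal" in heading_text:
--                 return True
--             # Stop at the first heading we hit, regardless
--             return False
--     return False
-- ===== SOURCE B (Python) =====
-- def is_acceptance_criteria_section(paragraph: str, full_text: str, para_start_line: int) -> bool:
--     """Forward single pass: remember the last heading seen above the paragraph,
--     decide once at the end."""
--     lines = full_text.splitlines()
--     upper = min(para_start_line - 1, len(lines))
--     last_heading = None
--     for raw in lines[:max(0, upper)]:
--         s = raw.strip()
--         if s.startswith("#"):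
--             last_heading = s.lstrip("#").strip().lower()
--     return last_heading is not None and (
--         "acceptance" in last_heading or "non-goal" in last_heading
--     )
-- ===== Notes on version B (the rewrite author's own statement) =====
-- stated objective: alternative
-- what changed: Replaced the backward early-exit index scan over range(...,-1,-1) with a forward single pass over the line prefix that accumulates the last heading seen and decides once after the loop.
import Mathlib
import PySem

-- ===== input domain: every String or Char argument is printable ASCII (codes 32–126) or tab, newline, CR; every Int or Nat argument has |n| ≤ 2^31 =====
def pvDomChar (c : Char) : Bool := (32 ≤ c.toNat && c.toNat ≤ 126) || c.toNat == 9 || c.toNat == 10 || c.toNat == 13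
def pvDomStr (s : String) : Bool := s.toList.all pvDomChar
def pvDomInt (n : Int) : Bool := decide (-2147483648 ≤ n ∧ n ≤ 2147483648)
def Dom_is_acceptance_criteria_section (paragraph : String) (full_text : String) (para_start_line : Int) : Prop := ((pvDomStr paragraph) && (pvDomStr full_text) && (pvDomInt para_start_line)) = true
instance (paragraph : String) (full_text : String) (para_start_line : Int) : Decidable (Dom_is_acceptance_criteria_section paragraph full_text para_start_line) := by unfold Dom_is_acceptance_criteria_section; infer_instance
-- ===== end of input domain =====

-- B replaces A's backward early-exit scan with a forward single pass that keeps the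
-- last heading seen and decides once after the loop (objective: alternative decomposition).

-- ===== PORT A =====
-- line.lstrip("#").strip().lower() — lstrip with a single-char set is dropWhile (exact)
def pvHeadingText (line : List Char) : List Char :=
  PySem.Chars.lower (PySem.Chars.strip (line.dropWhile (· == '#')))

-- '"acceptance" in heading_text or "non-goal" in heading_text'
def pvHit (h : List Char) : Bool :=
  PySem.Chars.isIn "acceptance".toList h || PySem.Chars.isIn "non-goal".toList h

-- A's backward loop with early returns, over the countdown index list; every index the
-- range produces is in bounds, so the pyGetD default "" is never read.
def pvALoop (lines : List String) : List Int → Bool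
  | [] => false
  | i :: rest =>
      let line := PySem.Chars.strip (PySem.List.pyGetD lines i "").toList
      if PySem.Chars.startswith line ['#'] then
        pvHit (pvHeadingText line)
      else
        pvALoop lines rest

def is_acceptance_criteria_section (paragraph : String) (full_text : String) (para_start_line : Int) : Bool :=
  let lines := PySem.Str.splitlines full_text
  pvALoop lines (PySem.List.pyRange (min (para_start_line - 1) (lines.length : Int) - 1) (-1) (-1))

-- ===== PORT B =====
def is_acceptance_criteria_section_alt (paragraph : String) (full_text : String) (para_start_line : Int) : Bool :=
  let lines := PySem.Str.splitlines full_text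
  let upper : Int := min (para_start_line - 1) (lines.length : Int)
  let last : Option (List Char) :=
    (PySem.List.slice lines none (some (max 0 upper))).foldl
      (fun acc raw =>
        let s := PySem.Chars.strip raw.toList
        if PySem.Chars.startswith s ['#'] then some (pvHeadingText s) else acc)
      none
  match last with
  | none => false
  | some h => pvHit h

-- ===== PRECONDITION & SPEC =====
def Spec_is_acceptance_criteria_section (paragraph : String) (full_text : String) (para_start_line : Int) (out : Bool) : Prop := out = is_acceptance_criteria_section_alt paragraph full_text para_start_line
instance (paragraph : String) (full_text : String) (para_start_line : Int) (out : Bool) : Decidable (Spec_is_acceptance_criteria_section paragraph full_text para_start_line out) := by unfold Spec_is_acceptance_criteria_section; infer_instance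

-- ===== CLAIM (what is proved, stated in full; the proofs are below) =====
def Claim_equal_is_acceptance_criteria_section : Prop := ∀ (paragraph : String) (full_text : String) (para_start_line : Int), Dom_is_acceptance_criteria_section paragraph full_text para_start_line → Spec_is_acceptance_criteria_section paragraph full_text para_start_line (is_acceptance_criteria_section paragraph full_text para_start_line)

-- ===== LEMMAS AND PROOFS =====

-- A's loop touches an index only through the lookup: lift it to a loop over the strings.
def pvALoopL : List String → Bool
  | [] => false
  | raw :: rest =>
      let line := PySem.Chars.strip raw.toList
      if PySem.Chars.startswith line ['#'] then pvHit (pvHeadingText line)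
      else pvALoopL rest

def pvStep (acc : Option (List Char)) (raw : String) : Option (List Char) :=
  let s := PySem.Chars.strip raw.toList
  if PySem.Chars.startswith s ['#'] then some (pvHeadingText s) else acc

lemma pvALoop_eq_loopL (lines : List String) (idxs : List Int) :
    pvALoop lines idxs = pvALoopL (idxs.map (fun i => PySem.List.pyGetD lines i "")) := by
  induction idxs with
  | nil => rfl
  | cons i rest ih => simp [pvALoop, pvALoopL, ih]

-- the backward scan equals the forward last-accumulating fold
lemma pvLoopL_reverse_eq_fold (ls : List String) :
    pvALoopL ls.reverse =
      (match ls.foldl pvStep none with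
       | none => false
       | some h => pvHit h) := by
  induction ls using List.reverseRecOn with
  | nil => rfl
  | append_singleton init last ih =>
      rw [List.reverse_append, List.foldl_append]
      simp only [List.reverse_singleton, List.singleton_append, List.foldl_cons, List.foldl_nil]
      by_cases h : PySem.Chars.startswith (PySem.Chars.strip last.toList) ['#']
      · simp [pvALoopL, pvStep, h]
      · simpa [pvALoopL, pvStep, h] using ih

-- the prefix of in-range lookups is List.take
lemma pvMap_pyGetD_range_take (xs : List String) (t : Nat) (ht : t ≤ xs.length) :
    (PySem.List.pyRange 0 (t : Int) 1).map (fun i => PySem.List.pyGetD xs i "") = xs.take t := by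
  induction t with
  | zero => simp
  | succ n ih =>
      rw [show ((n + 1 : Nat) : Int) = (n : Int) + 1 by push_cast; ring,
          PySem.List.pyRange_one_succ_right (by positivity), List.map_append,
          ih (by omega)]
      have hn : n < xs.length := by omega
      rw [List.take_add_one]
      simp [PySem.List.pyGetD_natCast, hn]

lemma pvCountdown_eq (u : Int) :
    PySem.List.pyRange (u - 1) (-1) (-1) = (PySem.List.pyRange 0 u 1).reverse := by
  have := PySem.List.pyRange_neg_one_eq_reverse (u - 1) (-1)
  simpa using this

lemma pvMain (lines : List String) (u : Int) (hle : u ≤ (lines.length : Int)) :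
    pvALoop lines (PySem.List.pyRange (u - 1) (-1) (-1)) =
      (match (PySem.List.slice lines none (some (max 0 u))).foldl pvStep none with
       | none => false
       | some h => pvHit h) := by
  have htake : PySem.List.slice lines none (some (max 0 u)) = lines.take (max 0 u).toNat :=
    PySem.List.slice_to lines (le_max_left 0 u)
  have hrange : PySem.List.pyRange 0 u 1 = PySem.List.pyRange 0 (((max 0 u).toNat : Int)) 1 := by
    by_cases h : u ≤ 0
    · rw [PySem.List.pyRange_one_eq_nil (by omega), PySem.List.pyRange_one_eq_nil (by omega)]
    · congr 1; omega
  have hmap : (PySem.List.pyRange 0 u 1).map (fun i => PySem.List.pyGetD lines i "")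
      = lines.take (max 0 u).toNat := by
    rw [hrange]
    exact pvMap_pyGetD_range_take lines (max 0 u).toNat (by omega)
  rw [pvALoop_eq_loopL, pvCountdown_eq, List.map_reverse, hmap, htake]
  exact pvLoopL_reverse_eq_fold (lines.take (max 0 u).toNat)

-- ===== VERDICT (by name: the statement is the Claim_ definition above) =====
theorem is_acceptance_criteria_section_spec : Claim_equal_is_acceptance_criteria_section := by
  intro paragraph full_text para_start_line _
  unfold Spec_is_acceptance_criteria_section
  exact pvMain (PySem.Str.splitlines full_text)
    (min (para_start_line - 1) ((PySem.Str.splitlines full_text).length : Int))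
    (min_le_right _ _)
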